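-- pv_equiv track=rewrite | github.com/kacperklusek/ASD | egz_3_2020/zad2.py | tower
-- ===== SOURCE A (Python) =====
-- def tower(A):
--     n = len(A)
--
--     # h[i] = najwyższa wieża do klocka i
--     h = [1 for i in range(n)]
--
--     for i in range(1, n):
--         for j in range(i):
--             if A[i][0] >= A[j][0] and A[i][1] <= A[j][1]:
--                 # klocek i może leżeć na klocku j
--                 h[i] = max(h[i], h[j]+1)
--
--     return max(h)
-- ===== SOURCE B (Python) =====
-- def tower(A):
--     # Mirsky-style peeling: repeatedly strip the blocks that cannot sit on any
--     # earlier remaining block; the number of peeling rounds is the tallest tower.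
--     rem = list(A)
--     rounds = 0
--     while rem:
--         rounds += 1
--         nxt = []
--         for k in range(len(rem)):
--             x, y = rem[k]
--             if any(x >= rem[j][0] and y <= rem[j][1] for j in range(k)):
--                 nxt.append((x, y))
--         rem = nxt
--     return rounds
-- ===== Notes on version B (the rewrite author's own statement) =====
-- stated objective: alternative
-- what changed: B replaces A's per-element height DP (mutable array indexed by nested range loops plus a final max() pass) by Mirsky-style peeling: repeatedly strip the blocks that cannot sit on any earlier remaining block and return the number of peeling rounds.
import Mathlib
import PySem

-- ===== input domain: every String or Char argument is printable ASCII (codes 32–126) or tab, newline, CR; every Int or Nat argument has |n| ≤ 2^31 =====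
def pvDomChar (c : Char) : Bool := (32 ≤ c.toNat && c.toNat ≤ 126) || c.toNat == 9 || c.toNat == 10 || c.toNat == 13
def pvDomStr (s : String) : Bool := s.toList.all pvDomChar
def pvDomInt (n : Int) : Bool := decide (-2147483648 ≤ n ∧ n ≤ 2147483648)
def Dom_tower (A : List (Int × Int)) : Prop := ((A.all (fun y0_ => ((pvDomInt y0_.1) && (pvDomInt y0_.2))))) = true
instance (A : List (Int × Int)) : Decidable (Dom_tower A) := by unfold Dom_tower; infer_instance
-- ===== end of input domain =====

-- B replaces A's per-element O(n^2) height DP (mutable array + final max pass) by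
-- Mirsky-style peeling: repeatedly strip the blocks with no earlier remaining
-- supporting block and count the rounds; a different algorithm, not claimed faster.

-- ===== PORT A =====
def tower (A : List (Int × Int)) : Int :=
  let n : Int := A.length
  -- h = [1 for i in range(n)]
  let h0 : List Int := (PySem.List.pyRange 0 n 1).map (fun _ => (1 : Int))
  -- nested loops, mutating h[i]
  let h := (PySem.List.pyRange 1 n 1).foldl (fun h i =>
      (PySem.List.pyRange 0 i 1).foldl (fun h j =>
        if (PySem.List.pyGetD A i (0, 0)).1 ≥ (PySem.List.pyGetD A j (0, 0)).1 ∧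
           (PySem.List.pyGetD A i (0, 0)).2 ≤ (PySem.List.pyGetD A j (0, 0)).2 then
          PySem.List.pySetD h i (max (PySem.List.pyGetD h i 0) (PySem.List.pyGetD h j 0 + 1))
        else h) h) h0
  -- max(h): raises on empty h, excluded by Pre_tower
  (PySem.List.max? h (fun y => y)).getD 0

-- ===== PORT B =====
-- "x >= px and y <= py": current block (first arg) can sit on an earlier one (second arg)
def cmpB (p q : Int × Int) : Bool := decide (p.1 ≥ q.1 ∧ p.2 ≤ q.2)

-- one peeling round: keep exactly the blocks that can sit on some earlier remaining block
-- (rem[k] / rem[j] with 0 ≤ j < k < len(rem) are in range, so List.getD is exact here)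
def keep (rem : List (Int × Int)) : List (Int × Int) :=
  (List.range rem.length).foldl (fun nxt k =>
    if (List.range k).any (fun j => cmpB (rem.getD k (0, 0)) (rem.getD j (0, 0))) then
      nxt ++ [rem.getD k (0, 0)]
    else nxt) []

-- termination of B's while loop: each round drops at least the first remaining block
theorem keep_length_lt (rem : List (Int × Int)) (h : rem ≠ []) :
    (keep rem).length < rem.length := by
  cases rem with
  | nil => exact absurd rfl h
  | cons p rest =>
    unfold keep
    rw [PySem.List.foldl_append_if]
    simp only [List.nil_append, List.length_map, List.length_cons]
    rw [List.range_succ_eq_map, List.filter_cons]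
    simp only [List.range_zero, List.any_nil]
    calc (List.filter _ ((List.range rest.length).map Nat.succ)).length
        ≤ ((List.range rest.length).map Nat.succ).length := List.length_filter_le _ _
      _ = rest.length := by simp
      _ < rest.length + 1 := by omega

-- the while loop, counting rounds
def peel (rem : List (Int × Int)) : Int :=
  if h : rem = [] then 0 else 1 + peel (keep rem)
termination_by rem.length
decreasing_by exact keep_length_lt rem h

def tower_alt (A : List (Int × Int)) : Int := peel A

-- ===== PRECONDITION & SPEC =====
-- Pre_ excludes only the empty list, on which A's max(h) raises ValueError.
def Pre_tower (A : List (Int × Int)) : Prop := A ≠ []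
instance (A : List (Int × Int)) : Decidable (Pre_tower A) := by unfold Pre_tower; infer_instance
def pvWitness_tower : (List (Int × Int)) := [(1, 2), (2, 1)]

def Spec_tower (A : List (Int × Int)) (out : Int) : Prop := out = tower_alt A
instance (A : List (Int × Int)) (out : Int) : Decidable (Spec_tower A out) := by unfold Spec_tower; infer_instance

-- ===== CLAIM (what is proved, stated in full; the proofs are below) =====
def Claim_equal_tower : Prop := ∀ (A : List (Int × Int)), Dom_tower A → Pre_tower A → Spec_tower A (tower A)

-- ===== LEMMAS AND PROOFS =====

-- block p can sit on block q
abbrev Pcond (q p : Int × Int) : Prop := p.1 ≥ q.1 ∧ p.2 ≤ q.2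

-- the DP height of a new block p given the processed blocks with their heights
def newH (acc : List ((Int × Int) × Int)) (p : Int × Int) : Int :=
  1 + acc.foldl (fun m t => if Pcond t.1 p then max m t.2 else m) 0

-- heights of the blocks of l, given the already-processed (block, height) list acc
def hsD (acc : List ((Int × Int) × Int)) : List (Int × Int) → List ((Int × Int) × Int)
  | [] => []
  | p :: r => let h := newH acc p; (p, h) :: hsD (acc ++ [(p, h)]) r

def heights (l : List (Int × Int)) : List Int := (hsD [] l).map (·.2)

lemma init_le_foldl_ite (P : ((Int × Int) × Int) → Prop) [DecidablePred P]
    (l : List ((Int × Int) × Int)) (c : Int) :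
    c ≤ l.foldl (fun m t => if P t then max m t.2 else m) c := by
  induction l generalizing c with
  | nil => simp
  | cons t r ih =>
    simp only [List.foldl_cons]
    refine le_trans ?_ (ih _)
    split <;> simp

lemma le_foldl_ite_of_mem (P : ((Int × Int) × Int) → Prop) [DecidablePred P]
    (s : (Int × Int) × Int) (hP : P s) :
    ∀ (l : List ((Int × Int) × Int)) (c : Int), s ∈ l →
    s.2 ≤ l.foldl (fun m t => if P t then max m t.2 else m) c := by
  intro l
  induction l with
  | nil => intro c hs; simp at hs
  | cons t r ih =>
    intro c hs
    simp only [List.foldl_cons]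
    rcases List.mem_cons.1 hs with h | h
    · subst h
      rw [if_pos hP]
      exact le_trans (le_max_right _ _) (init_le_foldl_ite P r _)
    · exact ih _ h

lemma foldl_ite_attain (P : ((Int × Int) × Int) → Prop) [DecidablePred P]
    (l : List ((Int × Int) × Int)) (c : Int) :
    l.foldl (fun m t => if P t then max m t.2 else m) c = c ∨
      ∃ s ∈ l, P s ∧ l.foldl (fun m t => if P t then max m t.2 else m) c = s.2 := by
  induction l generalizing c with
  | nil => left; rfl
  | cons t r ih =>
    simp only [List.foldl_cons]
    by_cases hP : P t
    · rw [if_pos hP]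
      rcases ih (max c t.2) with h | ⟨s, hs, hPs, hv⟩
      · rcases max_cases c t.2 with ⟨hm, _⟩ | ⟨hm, _⟩
        · left; rw [h, hm]
        · right; exact ⟨t, by simp, hP, by rw [h, hm]⟩
      · right; exact ⟨s, by simp [hs], hPs, hv⟩
    · rw [if_neg hP]
      rcases ih c with h | ⟨s, hs, hPs, hv⟩
      · left; exact h
      · right; exact ⟨s, by simp [hs], hPs, hv⟩

lemma hsD_pos (l : List (Int × Int)) : ∀ (acc : List ((Int × Int) × Int)),
    ∀ t ∈ hsD acc l, 1 ≤ t.2 := by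
  induction l with
  | nil => intro acc t ht; simp [hsD] at ht
  | cons p r ih =>
    intro acc t ht
    simp only [hsD, List.mem_cons] at ht
    rcases ht with h | h
    · subst h
      have := init_le_foldl_ite (fun t => Pcond t.1 p) acc 0
      simp only [newH]; omega
    · exact ih _ t h

-- chain property of the produced (block, height) list: each element's height is one
-- more than the best earlier supporting height, and strictly above every supporter
def GoodAt (pre : List ((Int × Int) × Int)) (t : (Int × Int) × Int) : Prop :=
  (∀ s ∈ pre, Pcond s.1 t.1 → s.2 < t.2) ∧
  (1 < t.2 → ∃ s ∈ pre, Pcond s.1 t.1 ∧ s.2 = t.2 - 1)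

lemma hsD_good (l : List (Int × Int)) : ∀ (acc : List ((Int × Int) × Int))
    (pre : List ((Int × Int) × Int)) (t : (Int × Int) × Int) (suf : List ((Int × Int) × Int)),
    hsD acc l = pre ++ t :: suf → GoodAt (acc ++ pre) t := by
  induction l with
  | nil =>
    intro acc pre t suf h
    simp only [hsD] at h
    exact absurd h.symm (List.append_ne_nil_of_right_ne_nil _ (by simp))
  | cons p r ih =>
    intro acc pre t suf h
    simp only [hsD] at h
    cases pre with
    | nil =>
      simp only [List.nil_append, List.cons.injEq] at h
      obtain ⟨rfl, _⟩ := h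
      rw [List.append_nil]
      constructor
      · intro s hs hP
        have hle : s.2 ≤ acc.foldl (fun m t => if Pcond t.1 p then max m t.2 else m) 0 :=
          le_foldl_ite_of_mem (fun t => Pcond t.1 p) s hP acc 0 hs
        simp only [newH]
        omega
      · intro h1
        simp only [newH] at h1 ⊢
        have hatt : acc.foldl (fun m t => if Pcond t.1 p then max m t.2 else m) 0 = 0 ∨
            ∃ s ∈ acc, Pcond s.1 p ∧
              acc.foldl (fun m t => if Pcond t.1 p then max m t.2 else m) 0 = s.2 :=
          foldl_ite_attain (fun t => Pcond t.1 p) acc 0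
        rcases hatt with hz | ⟨s, hs, hP, hv⟩
        · omega
        · exact ⟨s, hs, hP, by omega⟩
    | cons q pre' =>
      simp only [List.cons_append, List.cons.injEq] at h
      obtain ⟨rfl, h2⟩ := h
      have := ih (acc ++ [(p, newH acc p)]) pre' t suf h2
      simpa [List.append_assoc] using this

-- ===== B-side: keep = keepAux, and keep maps the r-filtered list to the (r+1)-filtered one =====

def keepAux (seen : List (Int × Int)) : List (Int × Int) → List (Int × Int)
  | [] => []
  | p :: rest => (if seen.any (cmpB p) then [p] else []) ++ keepAux (seen ++ [p]) rest

lemma getD_append_mid {α : Type} (H : List α) (v : α) (rep : List α) (d : α) :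
    (H ++ v :: rep).getD H.length d = v := by
  induction H with
  | nil => rfl
  | cons x r ih =>
    simp only [List.cons_append, List.length_cons, List.getD_cons_succ]
    exact ih

lemma getD_append_left {α : Type} (H : List α) (r : List α) (j : Nat) (hj : j < H.length) (d : α) :
    (H ++ r).getD j d = H.getD j d := by
  induction H generalizing j with
  | nil => simp at hj
  | cons x t ih =>
    cases j with
    | zero => rfl
    | succ j => simpa using ih j (by simpa using hj)

lemma any_range_getD {α : Type} (l l2 : List α) (d : α) (p : α → Bool) :
    (List.range l.length).any (fun j => p ((l ++ l2).getD j d)) = l.any p := by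
  have h1 : (List.range l.length).map (fun j => (l ++ l2).getD j d) = l := by
    apply List.ext_getElem
    · simp
    · intro i h1 h2
      simp only [List.getElem_map, List.getElem_range]
      rw [getD_append_left l l2 i (by simpa using h1) d,
        List.getD_eq_getElem l d (by simpa using h1)]
  conv_rhs => rw [← h1]
  rw [List.any_map]
  rfl

lemma keep_gen (rest : List (Int × Int)) : ∀ (seen acc : List (Int × Int)),
    (List.range rest.length).foldl (fun nxt k =>
      if (List.range (seen.length + k)).any
          (fun j => cmpB ((seen ++ rest).getD (seen.length + k) (0, 0))
                         ((seen ++ rest).getD j (0, 0))) then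
        nxt ++ [(seen ++ rest).getD (seen.length + k) (0, 0)]
      else nxt) acc = acc ++ keepAux seen rest := by
  induction rest with
  | nil => intro seen acc; simp [keepAux]
  | cons p rest' ih =>
    intro seen acc
    rw [List.length_cons, List.range_succ_eq_map, List.foldl_cons, List.foldl_map]
    have hmid : (seen ++ p :: rest').getD (seen.length + 0) (0, 0) = p := by
      simpa using getD_append_mid seen p rest' (0, 0)
    have hany : (List.range (seen.length + 0)).any
        (fun j => cmpB ((seen ++ p :: rest').getD (seen.length + 0) (0, 0))
                       ((seen ++ p :: rest').getD j (0, 0))) = seen.any (cmpB p) := by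
      simp only [Nat.add_zero, getD_append_mid seen p rest' (0, 0)]
      exact any_range_getD seen (p :: rest') (0, 0) (cmpB p)
    rw [hany, hmid]
    have harr : ∀ k : Nat, seen.length + Nat.succ k = (seen ++ [p]).length + k := by
      intro k; simp [List.length_append]; omega
    have hl : seen ++ p :: rest' = (seen ++ [p]) ++ rest' := by simp
    simp only [harr, hl]
    rw [ih (seen ++ [p])]
    simp only [keepAux]
    split <;> simp

lemma keep_eq_keepAux (rem : List (Int × Int)) : keep rem = keepAux [] rem := by
  have h := keep_gen rem [] []
  simpa [keep] using h

-- how one peeling round acts on the blocks whose height exceeds r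
lemma keepAux_filter (r : Int) (hr : 0 ≤ r) :
    ∀ (hs ctx : List ((Int × Int) × Int)),
    (∀ pre t suf, hs = pre ++ t :: suf → GoodAt (ctx ++ pre) t) →
    keepAux ((ctx.filter (fun t => decide (r < t.2))).map (·.1))
            ((hs.filter (fun t => decide (r < t.2))).map (·.1))
      = (hs.filter (fun t => decide (r + 1 < t.2))).map (·.1) := by
  intro hs
  induction hs with
  | nil => intro ctx _; simp [keepAux]
  | cons t rest ih =>
    intro ctx hgood
    have hgood0 : GoodAt ctx t := by
      have := hgood [] t rest (by simp)
      simpa using this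
    have hgoodRest : ∀ pre t' suf, rest = pre ++ t' :: suf → GoodAt ((ctx ++ [t]) ++ pre) t' := by
      intro pre t' suf h
      have := hgood (t :: pre) t' suf (by simp [h])
      simpa [List.append_assoc] using this
    have hctx : ((ctx ++ [t]).filter (fun s => decide (r < s.2)))
        = ctx.filter (fun s => decide (r < s.2)) ++ (if r < t.2 then [t] else []) := by
      rw [List.filter_append]
      congr 1
      split <;> simp_all
    -- the head test of keepAux: is some remaining earlier block a supporter of t?
    have hanyiff : (((ctx.filter (fun s => decide (r < s.2))).map (·.1)).any (cmpB t.1)) = true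
        ↔ ∃ s ∈ ctx, r < s.2 ∧ Pcond s.1 t.1 := by
      simp only [List.any_eq_true, List.mem_map, List.mem_filter, decide_eq_true_eq, cmpB]
      constructor
      · rintro ⟨q, ⟨s, ⟨hs, hlt⟩, rfl⟩, hc⟩
        exact ⟨s, hs, hlt, hc⟩
      · rintro ⟨s, hs, hlt, hc⟩
        exact ⟨s.1, ⟨s, ⟨hs, hlt⟩, rfl⟩, hc⟩
    by_cases ht : r < t.2
    · rw [List.filter_cons_of_pos (by simpa using ht), List.map_cons]
      simp only [keepAux]
      by_cases h2 : r + 1 < t.2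
      · have hone : 1 < t.2 := by omega
        obtain ⟨s, hs, hP, hh⟩ := hgood0.2 hone
        have hany : (((ctx.filter (fun s => decide (r < s.2))).map (·.1)).any (cmpB t.1)) = true :=
          hanyiff.2 ⟨s, hs, by omega, hP⟩
        rw [hany, if_pos rfl, List.filter_cons_of_pos (by simpa using h2), List.map_cons]
        have := ih (ctx ++ [t]) hgoodRest
        rw [hctx] at this
        simp only [if_pos ht, List.map_append, List.map_cons, List.map_nil] at this
        simpa using this
      · have hany : ¬ ((((ctx.filter (fun s => decide (r < s.2))).map (·.1)).any (cmpB t.1)) = true) := by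
          intro h
          obtain ⟨s, hs, hlt, hP⟩ := hanyiff.1 h
          have := hgood0.1 s hs hP
          omega
        rw [Bool.not_eq_true] at hany
        rw [hany, List.filter_cons_of_neg (by simpa using h2)]
        simp only [if_neg (by simp : ¬ (false = true)), List.nil_append]
        have := ih (ctx ++ [t]) hgoodRest
        rw [hctx] at this
        simp only [if_pos ht, List.map_append, List.map_cons, List.map_nil] at this
        simpa using this
    · have h2 : ¬ (r + 1 < t.2) := by omega
      rw [List.filter_cons_of_neg (by simpa using ht), List.filter_cons_of_neg (by simpa using h2)]
      have := ih (ctx ++ [t]) hgoodRest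
      rw [hctx] at this
      simp only [if_neg ht, List.append_nil] at this
      exact this

-- ===== max height =====

def Mh (hs : List ((Int × Int) × Int)) : Int := hs.foldl (fun m t => max m t.2) 0

lemma Mh_eq_foldl_map (hs : List ((Int × Int) × Int)) :
    Mh hs = (hs.map (·.2)).foldl max 0 := by
  rw [Mh, List.foldl_map]

lemma Mh_nonneg (hs : List ((Int × Int) × Int)) : 0 ≤ Mh hs := by
  rw [Mh_eq_foldl_map]
  exact (PySem.List.le_foldl_max _ _).1

lemma le_Mh_of_mem (hs : List ((Int × Int) × Int)) (t : (Int × Int) × Int) (ht : t ∈ hs) :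
    t.2 ≤ Mh hs := by
  rw [Mh_eq_foldl_map]
  exact (PySem.List.le_foldl_max _ _).2 t.2 (List.mem_map_of_mem ht)

lemma Mh_attain (hs : List ((Int × Int) × Int)) :
    Mh hs = 0 ∨ ∃ t ∈ hs, t.2 = Mh hs := by
  unfold Mh
  generalize hc : (0 : Int) = c
  clear hc
  induction hs generalizing c with
  | nil => left; rfl
  | cons t r ih =>
    simp only [List.foldl_cons]
    rcases ih (max c t.2) with h | ⟨s, hs, hv⟩
    · rcases max_cases c t.2 with ⟨hm, _⟩ | ⟨hm, _⟩
      · left; rw [h, hm]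
      · right; exact ⟨t, by simp, by rw [h, hm]⟩
    · right; exact ⟨s, by simp [hs], hv⟩

-- peel's defining equations
lemma peel_nil : peel [] = 0 := by
  unfold peel; rfl

lemma peel_cons (rem : List (Int × Int)) (h : rem ≠ []) :
    peel rem = 1 + peel (keep rem) := by
  conv_lhs => rw [peel]
  rw [dif_neg h]

-- counting the peeling rounds on the blocks of height > r
lemma peel_filter (hs : List ((Int × Int) × Int))
    (hgood : ∀ pre t suf, hs = pre ++ t :: suf → GoodAt pre t) :
    ∀ (k : Nat) (r : Int), 0 ≤ r → Mh hs - r ≤ k →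
    peel ((hs.filter (fun t => decide (r < t.2))).map (·.1)) = max (Mh hs - r) 0 := by
  intro k
  induction k with
  | zero =>
    intro r hr hk
    have hall : hs.filter (fun t => decide (r < t.2)) = [] := by
      rw [List.filter_eq_nil_iff]
      intro t ht
      have := le_Mh_of_mem hs t ht
      simp only [decide_eq_true_eq]
      omega
    rw [hall]
    simp only [List.map_nil, peel_nil]
    omega
  | succ k ih =>
    intro r hr hk
    by_cases hle : Mh hs ≤ r
    · have hall : hs.filter (fun t => decide (r < t.2)) = [] := by
        rw [List.filter_eq_nil_iff]
        intro t ht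
        have := le_Mh_of_mem hs t ht
        simp only [decide_eq_true_eq]
        omega
      rw [hall]
      simp only [List.map_nil, peel_nil]
      omega
    · rw [not_le] at hle
      have hpos : 0 < Mh hs := by omega
      rcases Mh_attain hs with h0 | ⟨t, ht, hv⟩
      · omega
      have hne : (hs.filter (fun t => decide (r < t.2))).map (·.1) ≠ [] := by
        intro hnil
        have : t ∈ hs.filter (fun t => decide (r < t.2)) :=
          List.mem_filter.2 ⟨ht, by simp only [decide_eq_true_eq]; omega⟩
        rw [List.map_eq_nil_iff.1 hnil] at this
        simp at this
      rw [peel_cons _ hne, keep_eq_keepAux]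
      have hstep := keepAux_filter r hr hs [] (by intro pre t' suf h; simpa using hgood pre t' suf h)
      simp only [List.filter_nil, List.map_nil] at hstep
      rw [hstep, ih (r + 1) (by omega) (by omega)]
      omega

-- ===== A-side (unchanged characterization: tower A = max? (heights A) getD 0) =====

lemma hsD_snoc (acc : List ((Int × Int) × Int)) (l : List (Int × Int)) (p : Int × Int) :
    hsD acc (l ++ [p]) = hsD acc l ++ [(p, newH (acc ++ hsD acc l) p)] := by
  induction l generalizing acc with
  | nil => simp [hsD]
  | cons q r ih =>
    simp only [List.cons_append, hsD, ih, List.append_assoc, List.cons_append, List.nil_append]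

lemma map_fst_hsD (acc : List ((Int × Int) × Int)) (l : List (Int × Int)) :
    (hsD acc l).map (·.1) = l := by
  induction l generalizing acc with
  | nil => simp [hsD]
  | cons p r ih => simp [hsD, ih]

lemma length_hsD (acc : List ((Int × Int) × Int)) (l : List (Int × Int)) :
    (hsD acc l).length = l.length := by
  induction l generalizing acc with
  | nil => simp [hsD]
  | cons p r ih => simp [hsD, ih]

lemma zip_self (l : List ((Int × Int) × Int)) :
    (l.map (·.1)).zip (l.map (·.2)) = l := by
  induction l with
  | nil => rfl
  | cons t r ih => simp [ih]

lemma set_append_mid (H : List Int) (v w : Int) (rep : List Int) :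
    (H ++ v :: rep).set H.length w = H ++ w :: rep := by
  induction H with
  | nil => rfl
  | cons x r ih => simp [ih]

lemma foldl_max_succ (P : Nat → Prop) [DecidablePred P] (l : List Nat) (f : Nat → Int) (c : Int) :
    l.foldl (fun v j => if P j then max v (f j + 1) else v) (c + 1)
      = 1 + l.foldl (fun v j => if P j then max v (f j) else v) c := by
  induction l generalizing c with
  | nil => simp; omega
  | cons j r ih =>
    simp only [List.foldl_cons]
    by_cases h : P j
    · simp only [h, if_true]
      have : max (c + 1) (f j + 1) = max c (f j) + 1 := by omega
      rw [this, ih]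
    · simp only [h, if_false, ih]

-- A's inner-loop body and inner loop, named for the proofs
def Abody (A : List (Int × Int)) (i : Int) (h : List Int) (j : Int) : List Int :=
  if (PySem.List.pyGetD A i (0, 0)).1 ≥ (PySem.List.pyGetD A j (0, 0)).1 ∧
     (PySem.List.pyGetD A i (0, 0)).2 ≤ (PySem.List.pyGetD A j (0, 0)).2 then
    PySem.List.pySetD h i (max (PySem.List.pyGetD h i 0) (PySem.List.pyGetD h j 0 + 1))
  else h

def Ainner (A : List (Int × Int)) (h : List Int) (i : Int) : List Int :=
  (PySem.List.pyRange 0 i 1).foldl (Abody A i) h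

-- condition of A's inner loop, by (Nat) indices
abbrev CondIdx (A : List (Int × Int)) (i j : Nat) : Prop :=
  (A.getD i (0, 0)).1 ≥ (A.getD j (0, 0)).1 ∧ (A.getD i (0, 0)).2 ≤ (A.getD j (0, 0)).2

lemma inner_inv (A : List (Int × Int)) (i : Nat) (H : List Int) (lenH : H.length = i)
    (rep : List Int) :
    ∀ (k : Nat), k ≤ i → ∀ (v : Int),
    (List.range k).foldl (fun h (kk : Nat) => Abody A i h ((0 : Int) + (kk : Int))) (H ++ v :: rep)
      = H ++ ((List.range k).foldl
          (fun v j => if CondIdx A i j then max v (H.getD j 0 + 1) else v) v) :: rep := by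
  intro k
  induction k with
  | zero => intro _ v; simp
  | succ k ih =>
    intro hk v
    rw [List.range_succ, List.foldl_append, List.foldl_append, ih (by omega) v]
    simp only [List.foldl_cons, List.foldl_nil]
    set w := (List.range k).foldl
      (fun v j => if CondIdx A i j then max v (H.getD j 0 + 1) else v) v with hw
    have hgi : PySem.List.pyGetD (H ++ w :: rep) ((i : Nat) : Int) 0 = w := by
      rw [PySem.List.pyGetD_natCast, ← lenH, getD_append_mid]
    have hgj : PySem.List.pyGetD (H ++ w :: rep) ((0 : Int) + (k : Int)) 0 = H.getD k 0 := by
      have h00 : ((0 : Int) + (k : Int)) = ((k : Nat) : Int) := by ring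
      rw [h00, PySem.List.pyGetD_natCast, getD_append_left _ _ _ (by omega)]
    have hgAj : PySem.List.pyGetD A ((0 : Int) + (k : Int)) (0, 0) = A.getD k (0, 0) := by
      have h00 : ((0 : Int) + (k : Int)) = ((k : Nat) : Int) := by ring
      rw [h00, PySem.List.pyGetD_natCast]
    have hgAi : PySem.List.pyGetD A ((i : Nat) : Int) (0, 0) = A.getD i (0, 0) := by
      rw [PySem.List.pyGetD_natCast]
    simp only [Abody, hgAi, hgAj, hgi, hgj]
    by_cases hc : CondIdx A i k
    · rw [if_pos (⟨hc.1, hc.2⟩ :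
          (A.getD i (0, 0)).1 ≥ (A.getD k (0, 0)).1 ∧ (A.getD i (0, 0)).2 ≤ (A.getD k (0, 0)).2),
        if_pos hc, PySem.List.pySetD_natCast, ← lenH, set_append_mid]
    · rw [if_neg (fun h => hc ⟨h.1, h.2⟩), if_neg hc]

lemma take_getD_eq (A : List (Int × Int)) (i j : Nat) (hj : j < i) (hi : i ≤ A.length) :
    (A.take i).getD j (0, 0) = A.getD j (0, 0) := by
  have hjl : j < A.length := lt_of_lt_of_le hj hi
  have h1 : j < (A.take i).length := by simp; omega
  rw [List.getD_eq_getElem _ _ h1, List.getD_eq_getElem _ _ hjl]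
  simp

lemma foldl_zip_eq_range (xs : List (Int × Int)) (ys : List Int)
    (g : Int → (Int × Int) → Int → Int) :
    ∀ (c : Int), ys.length = xs.length →
    (xs.zip ys).foldl (fun m t => g m t.1 t.2) c
      = (List.range xs.length).foldl (fun m j => g m (xs.getD j (0, 0)) (ys.getD j 0)) c := by
  induction xs generalizing ys with
  | nil => intro c _; simp
  | cons x xs ih =>
    intro c hlen
    cases ys with
    | nil => simp at hlen
    | cons y ys =>
      simp only [List.zip_cons_cons, List.foldl_cons, List.length_cons,
        List.range_succ_eq_map, List.foldl_map]
      rw [ih ys _ (by simpa using hlen)]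
      rfl

lemma foldl_max_one (P : Nat → Prop) [DecidablePred P] (l : List Nat) (f : Nat → Int) :
    l.foldl (fun v j => if P j then max v (f j + 1) else v) 1
      = 1 + l.foldl (fun v j => if P j then max v (f j) else v) 0 := by
  have h := foldl_max_succ P l f 0
  simpa using h

lemma heights_take_one (A : List (Int × Int)) (h : A ≠ []) :
    heights (A.take 1) = [1] := by
  cases A with
  | nil => simp at h
  | cons p r => simp [heights, hsD, newH]

lemma inner_value (A : List (Int × Int)) (i : Nat) (h2 : i < A.length) :
    (List.range i).foldl
      (fun v j => if CondIdx A i j then max v ((heights (A.take i)).getD j 0 + 1) else v) 1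
      = newH (hsD [] (A.take i)) (A.getD i (0, 0)) := by
  set H := heights (A.take i) with hH
  rw [foldl_max_one]
  unfold newH
  congr 1
  have hzip : hsD [] (A.take i) = (A.take i).zip H := by
    conv_lhs => rw [← zip_self (hsD [] (A.take i))]
    rw [map_fst_hsD]
    rfl
  have hlen' : H.length = (A.take i).length := by
    simp [hH, heights, length_hsD]
  rw [hzip, foldl_zip_eq_range (A.take i) H
    (fun m a b => if Pcond a (A.getD i (0, 0)) then max m b else m) 0 hlen']
  have hlen : (A.take i).length = i := by simp; omega
  rw [hlen]
  apply PySem.List.foldl_congr_mem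
  intro m j hj
  have hji : j < i := by simpa using hj
  rw [take_getD_eq A i j hji (le_of_lt h2)]

lemma inner_step (A : List (Int × Int)) (i : Nat) (h2 : i < A.length) :
    Ainner A (heights (A.take i) ++ List.replicate (A.length - i) 1) ((i : Nat) : Int)
      = heights (A.take (i + 1)) ++ List.replicate (A.length - (i + 1)) 1 := by
  set H := heights (A.take i) with hH
  have lenH : H.length = i := by
    simp [hH, heights, length_hsD]; omega
  have hrep : List.replicate (A.length - i) (1 : Int)
      = (1 : Int) :: List.replicate (A.length - (i + 1)) 1 := by
    have hni : A.length - i = (A.length - (i + 1)) + 1 := by omega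
    rw [hni, List.replicate_succ]
  have hiNat : (((i : Nat) : Int) - 0).toNat = i := by omega
  have htake : heights (A.take (i + 1)) = H ++ [newH (hsD [] (A.take i)) (A.getD i (0, 0))] := by
    have hts : A.take (i + 1) = A.take i ++ [A.getD i (0, 0)] := by
      rw [List.getD_eq_getElem _ _ h2]
      rw [List.take_add_one, List.getElem?_eq_getElem h2]
      rfl
    rw [hH, heights, heights, hts, hsD_snoc, List.map_append, List.nil_append]
    rfl
  unfold Ainner
  rw [hrep, PySem.List.pyRange_one, hiNat, List.foldl_map,
    inner_inv A i H lenH _ i le_rfl 1, htake]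
  have hv := inner_value A i h2
  rw [← hH] at hv
  rw [hv, List.append_assoc, List.singleton_append]

lemma outer_inv (A : List (Int × Int)) (m : Nat) (hm : m + 1 ≤ A.length) :
    (List.range m).foldl (fun h (k : Nat) => Ainner A h (1 + (k : Int))) (List.replicate A.length 1)
      = heights (A.take (m + 1)) ++ List.replicate (A.length - (m + 1)) 1 := by
  induction m with
  | zero =>
    simp only [List.range_zero, List.foldl_nil]
    have hne : A ≠ [] := by
      intro h; rw [h] at hm; simp at hm
    rw [heights_take_one A hne]
    have hl : A.length = (A.length - 1) + 1 := by omega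
    rw [hl, List.replicate_succ]
    rfl
  | succ m ih =>
    rw [List.range_succ, List.foldl_append, ih (by omega)]
    simp only [List.foldl_cons, List.foldl_nil]
    have hc : (1 : Int) + (m : Int) = (((m + 1 : Nat) : Nat) : Int) := by push_cast; ring
    rw [hc, inner_step A (m + 1) (by omega)]

lemma tower_eq (A : List (Int × Int)) :
    tower A = (PySem.List.max? (heights A) (fun y => y)).getD 0 := by
  by_cases hA : A = []
  · subst hA; rfl
  · have hn : 1 ≤ A.length := by
      cases A with
      | nil => exact absurd rfl hA
      | cons p r => simp
    have hgoal : tower A = (PySem.List.max?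
        ((PySem.List.pyRange 1 (A.length : Int) 1).foldl (Ainner A)
          ((PySem.List.pyRange 0 (A.length : Int) 1).map (fun _ => (1 : Int)))) (fun y => y)).getD 0 := rfl
    have h0eq : (PySem.List.pyRange 0 (A.length : Int) 1).map (fun _ => (1 : Int))
        = List.replicate A.length 1 := by
      rw [PySem.List.pyRange_one]
      have : (((A.length : Int)) - 0).toNat = A.length := by omega
      rw [this, List.map_map]
      rw [show ((fun (_ : Int) => (1 : Int)) ∘ fun (k : Nat) => ((0 : Int) + (k : Int))) = fun (_ : Nat) => (1 : Int) from rfl]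
      rw [List.map_const', List.length_range]
    have houter : PySem.List.pyRange 1 (A.length : Int) 1
        = (List.range (A.length - 1)).map (fun (k : Nat) => 1 + (k : Int)) := by
      rw [PySem.List.pyRange_one]
      have : (((A.length : Int)) - 1).toNat = A.length - 1 := by omega
      rw [this]
    rw [hgoal, h0eq, houter, List.foldl_map, outer_inv A (A.length - 1) (by omega)]
    have h1 : A.length - 1 + 1 = A.length := by omega
    rw [h1, List.take_length, Nat.sub_self, List.replicate_zero, List.append_nil]

-- tower A equals the maximum computed height
lemma tower_eq_Mh (A : List (Int × Int)) (h : A ≠ []) :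
    tower A = Mh (hsD [] A) := by
  rw [tower_eq]
  cases A with
  | nil => exact absurd rfl h
  | cons p r =>
    have h1 : hsD [] (p :: r) = (p, 1) :: hsD [(p, 1)] r := by
      simp [hsD, newH]
    rw [heights, Mh_eq_foldl_map, h1]
    simp only [List.map_cons, List.foldl_cons]
    rw [PySem.List.max?_id_cons, Option.getD_some]
    have hmax : max (0 : Int) ((p, 1).2) = 1 := by norm_num
    rw [hmax]

-- B equals the maximum computed height
lemma tower_alt_eq_Mh (A : List (Int × Int)) :
    tower_alt A = max (Mh (hsD [] A)) 0 := by
  have hfst : A = (hsD [] A).map (·.1) := (map_fst_hsD [] A).symm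
  have hfil : (hsD [] A).filter (fun t => decide ((0 : Int) < t.2)) = hsD [] A := by
    apply List.filter_eq_self.2
    intro t ht
    have := hsD_pos A [] t ht
    simp only [decide_eq_true_eq]
    omega
  have hgood : ∀ pre t suf, hsD [] A = pre ++ t :: suf → GoodAt pre t := by
    intro pre t suf hsplit
    have := hsD_good A [] pre t suf hsplit
    simpa using this
  have hpf := peel_filter (hsD [] A) hgood (Mh (hsD [] A)).toNat 0 le_rfl
    (by have := Mh_nonneg (hsD [] A); omega)
  rw [hfil] at hpf
  rw [tower_alt]
  conv_lhs => rw [hfst]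
  rw [hpf]
  omega

-- ===== VERDICT (by name: the statement is the Claim_ definition above) =====
theorem tower_spec : Claim_equal_tower := by
  intro A _ hne
  unfold Spec_tower
  rw [tower_eq_Mh A hne, tower_alt_eq_Mh]
  have := Mh_nonneg (hsD [] A)
  omega
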